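-- pv_equiv track=rewrite | github.com/DenisKa56russ/python_hw | solution/task4.py | calculate_completion_times
-- ===== SOURCE A (Python) =====
-- def calculate_completion_times(stages, details):
--     n = len(stages)
--     m = len(details)
--     completion_times = [0] * m
--     machine_available_times = [0] * n
--
--     for detail_idx in range(m):
--         start_time = details[detail_idx]
--
--         for stage_idx in range(n):
--
--             start_time = max(start_time, machine_available_times[stage_idx])
--
--             finish_time = start_time + stages[stage_idx]
--
--
--             machine_available_times[stage_idx] = finish_time
--
--
--             start_time = finish_time
--
--         completion_times[detail_idx] = finish_time
--
--     return completion_times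
-- ===== SOURCE B (Python) =====
-- def calculate_completion_times(stages, details):
--     # stage-outer sweep: times[d] holds detail d's completion time after the
--     # stages processed so far; per stage a single running machine_avail suffices.
--     times = list(details)
--     for stage_time in stages:
--         machine_avail = 0
--         new_times = []
--         for t in times:
--             finish = max(t, machine_avail) + stage_time
--             new_times.append(finish)
--             machine_avail = finish
--         times = new_times
--     return times
-- ===== Notes on version B (the rewrite author's own statement) =====
-- stated objective: alternative
-- what changed: Transposes the nested loops: B sweeps stage-outer with a single running machine-availability scalar per stage, instead of A's detail-outer loop maintaining a per-machine availability array.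
import Mathlib
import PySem

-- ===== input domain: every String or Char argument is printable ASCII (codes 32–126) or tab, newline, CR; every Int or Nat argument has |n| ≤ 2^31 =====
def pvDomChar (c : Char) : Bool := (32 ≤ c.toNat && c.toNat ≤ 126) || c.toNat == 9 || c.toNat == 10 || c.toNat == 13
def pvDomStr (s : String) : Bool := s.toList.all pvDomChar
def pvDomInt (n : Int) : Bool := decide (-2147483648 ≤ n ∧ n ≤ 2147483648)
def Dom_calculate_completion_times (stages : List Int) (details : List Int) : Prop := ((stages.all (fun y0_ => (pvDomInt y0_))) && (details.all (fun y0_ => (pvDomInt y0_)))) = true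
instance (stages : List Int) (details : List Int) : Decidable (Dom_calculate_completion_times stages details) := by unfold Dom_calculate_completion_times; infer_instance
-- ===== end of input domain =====

-- B transposes A's nested loops (stage-outer sweep with one running availability
-- scalar per stage, instead of detail-outer with a per-machine availability array);
-- same cost, different decomposition.

-- ===== PORT A =====
-- inner loop over the stages: state is (start_time, machine_available_times);
-- the returned Int is finish_time after the loop (when stages = [] Python's
-- finish_time is unbound and A raises UnboundLocalError — excluded by Pre_;
-- there this port just returns the initial start_time).
def pvAInner : List Int → List Int → Int → (Int × List Int)
  | t :: ts, a :: ms, start =>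
      let start' := max start a
      let finish := start' + t
      let (fin, ms') := pvAInner ts ms finish
      (fin, finish :: ms')
  | _, mach, start => (start, mach)

-- outer loop over the details: threads machine_available_times, emits finish_time
def pvAOuter (stages : List Int) : List Int → List Int → List Int
  | _, [] => []
  | mach, d :: ds =>
      let (fin, mach') := pvAInner stages mach d
      fin :: pvAOuter stages mach' ds

def calculate_completion_times (stages : List Int) (details : List Int) : List Int :=
  pvAOuter stages (List.replicate stages.length 0) details

-- ===== PORT B =====
-- one stage's sweep across all details, carrying the running machine_avail
def pvBRow (t : Int) : Int → List Int → List Int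
  | _, [] => []
  | avail, x :: xs =>
      let finish := max x avail + t
      finish :: pvBRow t finish xs

def calculate_completion_times_alt (stages : List Int) (details : List Int) : List Int :=
  stages.foldl (fun times stage_time => pvBRow stage_time 0 times) details

-- ===== PRECONDITION & SPEC =====
-- Pre_ excludes exactly the inputs where Python A raises UnboundLocalError:
-- stages empty with details non-empty (finish_time is never assigned).
def Pre_calculate_completion_times (stages : List Int) (details : List Int) : Prop :=
  stages ≠ [] ∨ details = []
instance (stages : List Int) (details : List Int) : Decidable (Pre_calculate_completion_times stages details) := by unfold Pre_calculate_completion_times; infer_instance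

def pvWitness_calculate_completion_times : List Int × List Int := ([2, 3], [1, 4])

def Spec_calculate_completion_times (stages : List Int) (details : List Int) (out : List Int) : Prop := out = calculate_completion_times_alt stages details
instance (stages : List Int) (details : List Int) (out : List Int) : Decidable (Spec_calculate_completion_times stages details out) := by unfold Spec_calculate_completion_times; infer_instance

-- ===== CLAIM (what is proved, stated in full; the proofs are below) =====
def Claim_equal_calculate_completion_times : Prop := ∀ (stages : List Int) (details : List Int), Dom_calculate_completion_times stages details → Pre_calculate_completion_times stages details → Spec_calculate_completion_times stages details (calculate_completion_times stages details)


-- ===== LEMMAS AND PROOFS =====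

-- loop interchange: running A's detail-outer loop with first machine m0 peeled
-- off equals first sweeping stage t across all details (B's row) and then
-- running A's loop on the remaining machines.
theorem pvInterchange (t : Int) (ts : List Int) :
    ∀ (ds : List Int) (m0 : Int) (ms : List Int),
      pvAOuter (t :: ts) (m0 :: ms) ds = pvAOuter ts ms (pvBRow t m0 ds) := by
  intro ds
  induction ds with
  | nil => intro m0 ms; simp [pvAOuter, pvBRow]
  | cons d ds ih =>
      intro m0 ms
      simp only [pvAOuter, pvAInner, pvBRow]
      rw [ih]

-- with no stages, A's outer loop copies details through
theorem pvAOuter_nil : ∀ (mach ds : List Int), pvAOuter [] mach ds = ds := by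
  intro mach ds
  induction ds generalizing mach with
  | nil => simp [pvAOuter]
  | cons d ds ih => simp [pvAOuter, pvAInner, ih]

theorem pvMain : ∀ (stages details : List Int),
    calculate_completion_times stages details = calculate_completion_times_alt stages details := by
  intro stages
  unfold calculate_completion_times calculate_completion_times_alt
  induction stages with
  | nil => intro details; simp [pvAOuter_nil]
  | cons t ts ih =>
      intro details
      simp only [List.length_cons, List.replicate_succ, List.foldl_cons]
      rw [pvInterchange, ih]

-- ===== VERDICT (by name: the statement is the Claim_ definition above) =====
theorem calculate_completion_times_spec : Claim_equal_calculate_completion_times := by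
  intro stages details _ _
  exact pvMain stages details
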